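-- pv_equiv track=rewrite | github.com/StanFromIreland/pefetch | pefetch/cli.py | latexizer
-- ===== SOURCE A (Python) =====
-- def latexizer(string):
--     string = string.replace('$$', '$')
--     OPENING_DLLR = True
--     result = []
--     for char in string:
--         if char == '$':
--             if OPENING_DLLR:
--                 result.append('\u001b[37;1m')
--             else:
--                 result.append('\u001b[0m')
--             OPENING_DLLR = not OPENING_DLLR
--         else:
--             result.append(char)
--
--     string = ''.join(result)
--     string = string.replace('\\dots', '...')
--     string = string.replace('\\times', '*')
--     return string
-- ===== SOURCE B (Python) =====
-- def latexizer(string):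
--     parts = string.replace('$$', '$').split('$')
--     pieces = []
--     for i, part in enumerate(parts):
--         if i > 0:
--             pieces.append('\u001b[37;1m' if i % 2 == 1 else '\u001b[0m')
--         pieces.append(part)
--     return ''.join(pieces).replace('\\dots', '...').replace('\\times', '*')
-- ===== Notes on version B (the rewrite author's own statement) =====
-- stated objective: idiomatic
-- what changed: Replaces the per-character loop with an OPENING_DLLR flag by splitting the string on the dollar delimiter and rejoining the segments with the ANSI code chosen by the parity of the segment index.
import Mathlib
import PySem

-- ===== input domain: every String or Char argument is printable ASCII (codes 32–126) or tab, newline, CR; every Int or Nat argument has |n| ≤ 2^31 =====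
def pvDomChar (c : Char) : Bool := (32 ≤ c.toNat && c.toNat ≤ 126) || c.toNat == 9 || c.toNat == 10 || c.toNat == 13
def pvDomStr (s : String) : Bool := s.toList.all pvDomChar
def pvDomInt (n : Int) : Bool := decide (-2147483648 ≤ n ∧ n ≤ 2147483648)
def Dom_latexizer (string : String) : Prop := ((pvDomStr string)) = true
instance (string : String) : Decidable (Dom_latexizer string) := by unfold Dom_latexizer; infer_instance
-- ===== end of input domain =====

-- B replaces A's per-character loop with a Boolean flag by splitting on the dollar delimiter and
-- interleaving the segments with ANSI codes chosen by segment-index parity (idiomatic; C-level split/join, measured faster).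

-- ===== PORT A =====
-- literal transliteration: the per-character loop with the OPENING_DLLR flag,
-- accumulating a list of string pieces, then join and the two replaces
def latexizer (string : String) : String :=
  let s1 := PySem.Str.replace string "$$" "$"
  let st := s1.toList.foldl (fun (st : Bool × List String) char =>
      if char = '$' then
        if st.1 then (false, st.2 ++ ["\u001b[37;1m"])
        else (true, st.2 ++ ["\u001b[0m"])
      else (st.1, st.2 ++ [String.singleton char])) (true, ([] : List String))
  let s2 := PySem.Str.join "" st.2
  PySem.Str.replace (PySem.Str.replace s2 "\\dots" "...") "\\times" "*"

-- ===== PORT B =====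
-- literal transliteration of Source B: split on '$', rebuild interleaving the ANSI code
-- chosen by the parity of the part index ('.getD []' only discharges split?'s
-- Option — the separator "$" is nonempty, so it never fires)
def latexizer_alt (string : String) : String :=
  let parts := (PySem.Str.split? (PySem.Str.replace string "$$" "$") "$").getD []
  let pieces := (PySem.List.enumerate parts 0).foldl (fun (acc : List String) ip =>
      (if ip.1 > 0 then
        acc ++ [if PySem.Int.mod ip.1 2 == 1 then "\u001b[37;1m" else "\u001b[0m"]
       else acc) ++ [ip.2]) []
  PySem.Str.replace (PySem.Str.replace (PySem.Str.join "" pieces) "\\dots" "...") "\\times" "*"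

-- ===== PRECONDITION & SPEC =====
def Spec_latexizer (string : String) (out : String) : Prop := out = latexizer_alt string
instance (string : String) (out : String) : Decidable (Spec_latexizer string out) := by unfold Spec_latexizer; infer_instance

-- ===== CLAIM (what is proved, stated in full; the proofs are below) =====
def Claim_equal_latexizer : Prop := ∀ (string : String), Dom_latexizer string → Spec_latexizer string (latexizer string)

-- ===== LEMMAS AND PROOFS =====

-- ANSI code picked by the flag (A's view)
def pvCode (b : Bool) : List Char := if b then "\u001b[37;1m".toList else "\u001b[0m".toList

-- A's pieces, as char lists
def pvAP : List Char → Bool → List (List Char)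
  | [], _ => []
  | c :: t, b => if c = '$' then pvCode b :: pvAP t (!b) else [c] :: pvAP t b

-- A's pieces, as strings (what the fold accumulates)
def pvAPS : List Char → Bool → List String
  | [], _ => []
  | c :: t, b =>
      if c = '$' then (if b then "\u001b[37;1m" else "\u001b[0m") :: pvAPS t (!b)
      else String.singleton c :: pvAPS t b

-- plain split on '$'
def pvSplitP : List Char → List (List Char)
  | [] => [[]]
  | c :: t =>
      if c = '$' then [] :: pvSplitP t
      else
        match pvSplitP t with
        | [] => [[c]]
        | p :: ps => (c :: p) :: ps

-- segments glued with alternating codes starting from flag b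
def pvGlue : Bool → List (List Char) → List Char
  | _, [] => []
  | _, [p] => p
  | b, p :: q :: ps => p ++ pvCode b ++ pvGlue (!b) (q :: ps)

-- B's code/segment tail, index i from 1
def pvInterl : Int → List String → List String
  | _, [] => []
  | i, p :: ps => (if PySem.Int.mod i 2 == 1 then "\u001b[37;1m" else "\u001b[0m") :: p :: pvInterl (i + 1) ps

theorem pvSplitP_ne_nil (cs : List Char) : pvSplitP cs ≠ [] := by
  cases cs with
  | nil => simp [pvSplitP]
  | cons c t =>
    simp only [pvSplitP]
    split
    · simp
    · cases h : pvSplitP t <;> simp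

theorem pvFoldA (cs : List Char) : ∀ (b : Bool) (init : List String),
    (cs.foldl (fun (st : Bool × List String) char =>
      if char = '$' then
        if st.1 then (false, st.2 ++ ["\u001b[37;1m"])
        else (true, st.2 ++ ["\u001b[0m"])
      else (st.1, st.2 ++ [String.singleton char])) (b, init)).2 = init ++ pvAPS cs b := by
  induction cs with
  | nil => intro b init; simp [pvAPS]
  | cons c t ih =>
    intro b init
    by_cases hc : c = '$'
    · cases b <;> simp [hc, pvAPS, List.foldl_cons, ih]
    · simp [hc, pvAPS, List.foldl_cons, ih]

theorem pvAP_eq_map (cs : List Char) : ∀ b, pvAP cs b = (pvAPS cs b).map String.toList := by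
  induction cs with
  | nil => intro b; simp [pvAP, pvAPS]
  | cons c t ih =>
    intro b
    by_cases hc : c = '$'
    · cases b <;> simp [hc, pvAP, pvAPS, pvCode, ih]
    · simp [hc, pvAP, pvAPS, ih, String.singleton]

theorem pvGlue_cons (b : Bool) (c : Char) (p : List Char) (ps : List (List Char)) :
    pvGlue b ((c :: p) :: ps) = c :: pvGlue b (p :: ps) := by
  cases ps <;> simp [pvGlue]

theorem pvFlatten_aP (cs : List Char) : ∀ b, (pvAP cs b).flatten = pvGlue b (pvSplitP cs) := by
  induction cs with
  | nil => intro b; simp [pvAP, pvSplitP, pvGlue]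
  | cons c t ih =>
    intro b
    by_cases hc : c = '$'
    · obtain ⟨p, ps, hps⟩ : ∃ p ps, pvSplitP t = p :: ps := by
        cases h : pvSplitP t with
        | nil => exact absurd h (pvSplitP_ne_nil t)
        | cons p ps => exact ⟨p, ps, rfl⟩
      simp [hc, pvAP, pvSplitP, pvGlue, ih, hps]
    · obtain ⟨p, ps, hps⟩ : ∃ p ps, pvSplitP t = p :: ps := by
        cases h : pvSplitP t with
        | nil => exact absurd h (pvSplitP_ne_nil t)
        | cons p ps => exact ⟨p, ps, rfl⟩
      simp only [pvAP, pvSplitP, if_neg hc, hps, List.flatten_cons, List.singleton_append]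
      rw [pvGlue_cons, ← hps, ih]

theorem pvGoStep (fu : Nat) (c : Char) (rest cur : List Char) (acc : List (List Char)) :
    PySem.Chars.splitOn.go ['$'] (fu + 1) (c :: rest) cur acc =
      if List.isPrefixOf ['$'] (c :: rest) = true then
        PySem.Chars.splitOn.go ['$'] fu (List.drop (['$'] : List Char).length (c :: rest)) [] (cur.reverse :: acc)
      else PySem.Chars.splitOn.go ['$'] fu rest (c :: cur) acc := rfl

-- the fuel-based splitOn.go computes pvSplitP (single-char separator '$')
theorem pvGo_eq (l : List Char) : ∀ (fuel : Nat) (cur : List Char) (acc : List (List Char)),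
    l.length ≤ fuel →
    PySem.Chars.splitOn.go ['$'] fuel l cur acc =
      acc.reverse ++ (match pvSplitP l with
        | [] => [cur.reverse]
        | p :: ps => (cur.reverse ++ p) :: ps) := by
  induction l with
  | nil =>
    intro fuel cur acc _
    cases fuel <;> simp [PySem.Chars.splitOn.go.eq_def, pvSplitP]
  | cons c t ih =>
    intro fuel cur acc hf
    cases fuel with
    | zero => simp at hf
    | succ f =>
      have hft : t.length ≤ f := by simpa using hf
      obtain ⟨p, ps, hps⟩ : ∃ p ps, pvSplitP t = p :: ps := by
        cases h : pvSplitP t with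
        | nil => exact absurd h (pvSplitP_ne_nil t)
        | cons p ps => exact ⟨p, ps, rfl⟩
      rw [pvGoStep]
      by_cases hc : c = '$'
      · subst hc
        rw [if_pos (by simp [List.isPrefixOf] : List.isPrefixOf ['$'] ('$' :: t) = true)]
        have hdrop : List.drop (['$'] : List Char).length ('$' :: t) = t := by simp
        rw [hdrop, ih f [] (cur.reverse :: acc) hft]
        simp [pvSplitP, hps]
      · have hpre : List.isPrefixOf ['$'] (c :: t) = false := by
          simp only [List.isPrefixOf, Bool.and_eq_false_iff, beq_eq_false_iff_ne, ne_eq]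
          exact Or.inl fun h => hc h.symm
        rw [if_neg (by simp [hpre])]
        rw [ih f (c :: cur) acc hft]
        simp [pvSplitP, if_neg hc, hps, List.append_assoc]

theorem pvSplitOn_eq (cs : List Char) : PySem.Chars.splitOn cs ['$'] = pvSplitP cs := by
  unfold PySem.Chars.splitOn
  rw [pvGo_eq cs (cs.length + 1) [] [] (by omega)]
  obtain ⟨p, ps, hps⟩ : ∃ p ps, pvSplitP cs = p :: ps := by
    cases h : pvSplitP cs with
    | nil => exact absurd h (pvSplitP_ne_nil cs)
    | cons p ps => exact ⟨p, ps, rfl⟩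
  simp [hps]

-- B's fold over the enumerated parts
theorem pvFoldB (ps : List String) : ∀ (i : Int) (init : List String), 1 ≤ i →
    (PySem.List.enumerate ps i).foldl (fun (acc : List String) ip =>
      (if ip.1 > 0 then
        acc ++ [if PySem.Int.mod ip.1 2 == 1 then "\u001b[37;1m" else "\u001b[0m"]
       else acc) ++ [ip.2]) init = init ++ pvInterl i ps := by
  induction ps with
  | nil => intro i init _; simp [pvInterl, PySem.List.enumerate_nil]
  | cons p t ih =>
    intro i init hi
    rw [PySem.List.enumerate_cons, List.foldl_cons]
    have h0 : (i > 0) = True := by simp; omega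
    rw [ih (i + 1) _ (by omega)]
    simp [pvInterl, h0]

theorem pvInterl_glue (ps : List String) : ∀ (p : List Char) (i : Int) (b : Bool),
    1 ≤ i → ((PySem.Int.mod i 2 == 1) = b) →
    p ++ ((pvInterl i ps).map String.toList).flatten = pvGlue b (p :: ps.map String.toList) := by
  induction ps with
  | nil => intro p i b _ _; simp [pvInterl, pvGlue]
  | cons q t ih =>
    intro p i b hi hb
    have hm : ∀ j : Int, PySem.Int.mod j 2 = j % 2 := by
      intro j
      unfold PySem.Int.mod
      rw [Int.fmod_eq_emod]
      simp
    have hb' : (PySem.Int.mod (i + 1) 2 == 1) = !b := by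
      rw [hm]
      rw [hm] at hb
      cases b with
      | false =>
        have h0 : ¬ (i % 2 = 1) := by simpa using hb
        have h1 : (i + 1) % 2 = 1 := by omega
        simp [h1]
      | true =>
        have h1 : i % 2 = 1 := by simpa using hb
        have h0 : (i + 1) % 2 = 0 := by omega
        simp [h0]
    rw [pvInterl, List.map_cons, List.map_cons, List.flatten_cons, List.map_cons, pvGlue]
    rw [← List.append_assoc, ← ih q.toList (i + 1) (!b) (by omega) hb']
    subst hb
    cases hcode : (PySem.Int.mod i 2 == 1) <;> simp [pvCode]

theorem pvJoin_nil (ls : List (List Char)) : PySem.Chars.join [] ls = ls.flatten := by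
  unfold PySem.Chars.join
  induction ls with
  | nil => simp [List.intercalate]
  | cons a t ih =>
    cases t with
    | nil => simp [List.intercalate]
    | cons b u =>
      simp only [List.intercalate, List.intersperse_cons₂, List.flatten_cons] at *
      simp [ih]

-- the joined middle strings agree
theorem pvMiddle (s1 : String) :
    (PySem.Str.join ""
      (s1.toList.foldl (fun (st : Bool × List String) char =>
        if char = '$' then
          if st.1 then (false, st.2 ++ ["\u001b[37;1m"])
          else (true, st.2 ++ ["\u001b[0m"])
        else (st.1, st.2 ++ [String.singleton char])) (true, ([] : List String))).2) =
    PySem.Str.join ""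
      ((PySem.List.enumerate ((PySem.Str.split? s1 "$").getD []) 0).foldl
        (fun (acc : List String) ip =>
          (if ip.1 > 0 then
            acc ++ [if PySem.Int.mod ip.1 2 == 1 then "\u001b[37;1m" else "\u001b[0m"]
           else acc) ++ [ip.2]) []) := by
  apply String.toList_inj.mp
  rw [PySem.Str.toList_join, PySem.Str.toList_join]
  rw [pvFoldA s1.toList true []]
  have hsplit : (PySem.Str.split? s1 "$").getD [] =
      (pvSplitP s1.toList).map String.ofList := by
    simp [PySem.Str.split?, PySem.Chars.split?, pvSplitOn_eq]
  rw [hsplit]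
  obtain ⟨p, ps, hps⟩ : ∃ p ps, pvSplitP s1.toList = p :: ps := by
    cases h : pvSplitP s1.toList with
    | nil => exact absurd h (pvSplitP_ne_nil s1.toList)
    | cons p ps => exact ⟨p, ps, rfl⟩
  rw [hps, List.map_cons, PySem.List.enumerate_cons]
  rw [List.foldl_cons]
  rw [if_neg (by omega : ¬((0 : Int) > 0)), show ((0 : Int) + 1) = 1 by decide]
  rw [pvFoldB (ps.map String.ofList) 1 ([] ++ [((0 : Int), String.ofList p).2]) (by omega)]
  rw [show ("" : String).toList = [] from rfl, pvJoin_nil, pvJoin_nil]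
  simp only [List.nil_append, List.singleton_append, List.map_cons, List.flatten_cons,
    String.toList_ofList]
  rw [← pvAP_eq_map, pvFlatten_aP, hps]
  rw [pvInterl_glue (ps.map String.ofList) p 1 true (by omega) (by decide)]
  simp [Function.comp_def]

-- ===== VERDICT (by name: the statement is the Claim_ definition above) =====
theorem latexizer_spec : Claim_equal_latexizer := by
  intro s _
  simp only [Spec_latexizer, latexizer, latexizer_alt]
  rw [pvMiddle]
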